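-- pv_equiv track=rewrite | github.com/HarivaradhanKM/Python_Coding | IDP - Answers/IDP 2 Medium 1.py | create_list_of_freq_and_companies
-- ===== SOURCE A (Python) =====
-- def create_list_of_freq_and_companies(companies):
--     freq_dictionary = {}
--     set_companies = list(set(companies))
--     set_companies.sort()
--
--     for each_company in set_companies:
--         frequency = companies.count(each_company)
--         if frequency in freq_dictionary.keys():
--             freq_dictionary[frequency].append(each_company)
--         else:
--             freq_dictionary[frequency] = [each_company]
--
--     list_of_freq_and_companies = list(freq_dictionary.items())
--     list_of_freq_and_companies.sort(reverse = True)
--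
--     return list_of_freq_and_companies
-- ===== SOURCE B (Python) =====
-- def create_list_of_freq_and_companies(companies):
--     freq_dictionary = {}
--     current = None
--     run = 0
--     for c in sorted(companies):
--         if current is not None and c == current:
--             run += 1
--         else:
--             if current is not None:
--                 freq_dictionary.setdefault(run, []).append(current)
--             current = c
--             run = 1
--     if current is not None:
--         freq_dictionary.setdefault(run, []).append(current)
--     return sorted(freq_dictionary.items(), reverse=True)
-- ===== Notes on version B (the rewrite author's own statement) =====
-- stated objective: faster
-- what changed: Replaces the per-distinct-company companies.count scan (quadratic) with one sort of the input followed by a single run-length pass that emits each company with its run length.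
import Mathlib
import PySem

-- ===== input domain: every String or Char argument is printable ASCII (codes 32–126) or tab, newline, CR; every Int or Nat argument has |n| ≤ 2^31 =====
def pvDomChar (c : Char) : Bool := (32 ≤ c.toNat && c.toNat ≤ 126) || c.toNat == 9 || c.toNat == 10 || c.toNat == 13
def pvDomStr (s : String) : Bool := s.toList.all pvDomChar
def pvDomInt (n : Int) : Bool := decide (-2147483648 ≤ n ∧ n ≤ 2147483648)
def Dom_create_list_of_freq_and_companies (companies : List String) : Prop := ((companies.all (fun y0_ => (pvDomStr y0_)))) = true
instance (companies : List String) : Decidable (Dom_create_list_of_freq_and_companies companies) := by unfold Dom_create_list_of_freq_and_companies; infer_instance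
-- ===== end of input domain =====

-- B replaces A's per-distinct-company companies.count scan by one sort of the input
-- followed by a single run-length pass (objective: faster).

-- ===== PORT A =====
def create_list_of_freq_and_companies (companies : List String) : List (Int × List String) :=
  -- set_companies = list(set(companies)); set_companies.sort()
  let set_companies := PySem.List.sorted (PySem.Set.ofList companies) (fun x => x)
  let freq_dictionary := set_companies.foldl (fun d each_company =>
      let frequency : Int := (companies.count each_company : Int)
      if d.contains frequency then d.modify frequency [] (fun l => l ++ [each_company])
      else d.insert frequency [each_company]) PySem.Dict.empty
  PySem.List.sorted2 freq_dictionary.items (fun p => p.1) (fun p => p.2) true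

-- ===== PORT B =====
-- freq_dictionary.setdefault(run, []).append(current)
def pvEmit (d : PySem.Dict Int (List String)) (run : Int) (current : String) : PySem.Dict Int (List String) :=
  (d.setdefault run []).modify run [] (fun l => l ++ [current])

-- one iteration of B's for-loop; state = (freq_dictionary, current, run)
def pvStep (st : PySem.Dict Int (List String) × Option String × Int) (c : String) :
    PySem.Dict Int (List String) × Option String × Int :=
  match st with
  | (d, some v, run) => if c == v then (d, some v, run + 1) else (pvEmit d run v, some c, 1)
  | (d, none, _) => (d, some c, 1)

-- the final 'if current is not None: emit' flush
def pvFinish (st : PySem.Dict Int (List String) × Option String × Int) : PySem.Dict Int (List String) :=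
  match st.2.1 with
  | some v => pvEmit st.1 st.2.2 v
  | none => st.1

def create_list_of_freq_and_companies_alt (companies : List String) : List (Int × List String) :=
  let st := (PySem.List.sorted companies (fun x => x)).foldl pvStep (PySem.Dict.empty, none, 0)
  let d := pvFinish st
  PySem.List.sorted2 d.items (fun p => p.1) (fun p => p.2) true

-- ===== PRECONDITION & SPEC =====
def Spec_create_list_of_freq_and_companies (companies : List String) (out : List (Int × List String)) : Prop := out = create_list_of_freq_and_companies_alt companies
instance (companies : List String) (out : List (Int × List String)) : Decidable (Spec_create_list_of_freq_and_companies companies out) := by unfold Spec_create_list_of_freq_and_companies; infer_instance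

-- ===== CLAIM (what is proved, stated in full; the proofs are below) =====
def Claim_equal_create_list_of_freq_and_companies : Prop := ∀ (companies : List String), Dom_create_list_of_freq_and_companies companies → Spec_create_list_of_freq_and_companies companies (create_list_of_freq_and_companies companies)

-- ===== LEMMAS AND PROOFS =====

-- proof-side helpers: adjacent run-length encoding and ordered dedup
def pvMerge (p : String × Int) (rs : List (String × Int)) : List (String × Int) :=
  match rs with
  | (w, m) :: t => if p.1 = w then (w, p.2 + m) :: t else p :: (w, m) :: t
  | [] => [p]

def pvRuns : List String → List (String × Int)
  | [] => []
  | x :: xs => pvMerge (x, 1) (pvRuns xs)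

def pvUniq : List String → List String
  | [] => []
  | x :: xs =>
    match pvUniq xs with
    | [] => [x]
    | y :: t => if x = y then y :: t else x :: y :: t

def pvEmitAll (d : PySem.Dict Int (List String)) (rs : List (String × Int)) : PySem.Dict Int (List String) :=
  rs.foldl (fun d p => pvEmit d p.2 p.1) d

-- B's setdefault-append equals A's if/contains branch
theorem pvEmit_eq (d : PySem.Dict Int (List String)) (k : Int) (v : String) :
    pvEmit d k v = if d.contains k then d.modify k [] (fun l => l ++ [v]) else d.insert k [v] := by
  by_cases h : d.contains k = true
  · simp [pvEmit, h, PySem.Dict.setdefault_of_contains d _ h]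
  · simp only [Bool.not_eq_true] at h
    rw [pvEmit, PySem.Dict.setdefault_of_not_contains d _ h]
    simp [h, PySem.Dict.modify, PySem.Dict.getD_insert, PySem.Dict.insert_insert_self]

theorem pvMerge_merge (v : String) (k : Int) (rs : List (String × Int)) :
    pvMerge (v, k) (pvMerge (v, 1) rs) = pvMerge (v, k + 1) rs := by
  cases rs with
  | nil => simp [pvMerge]
  | cons p t =>
    obtain ⟨w, m⟩ := p
    by_cases h : v = w <;> simp [pvMerge, h] <;> ring

theorem pvMerge_ne (v c : String) (k : Int) (rs : List (String × Int)) (h : c ≠ v) :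
    pvMerge (v, k) (pvMerge (c, 1) rs) = (v, k) :: pvMerge (c, 1) rs := by
  cases rs with
  | nil => simp [pvMerge, (Ne.symm h)]
  | cons p t =>
    obtain ⟨w, m⟩ := p
    by_cases hw : c = w <;> simp [pvMerge, hw, Ne.symm h] <;> simp [← hw, Ne.symm h]

theorem pvLoop_eq (s : List String) : ∀ (d : PySem.Dict Int (List String)) (v : String) (k : Int),
    pvFinish (s.foldl pvStep (d, some v, k)) = pvEmitAll d (pvMerge (v, k) (pvRuns s)) := by
  induction s with
  | nil => intro d v k; simp [pvFinish, pvEmitAll, pvMerge, pvRuns]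
  | cons c t ih =>
    intro d v k
    by_cases h : c = v
    · subst h
      simp only [List.foldl_cons, pvStep, beq_self_eq_true, if_true, ih, pvRuns, pvMerge_merge]
    · have hb : (c == v) = false := by simp [h]
      simp only [List.foldl_cons, pvStep, hb, Bool.false_eq_true, if_false, ih, pvRuns,
        pvMerge_ne v c k _ h]
      rfl

theorem pvTop_eq (s : List String) (d : PySem.Dict Int (List String)) :
    pvFinish (s.foldl pvStep (d, none, 0)) = pvEmitAll d (pvRuns s) := by
  cases s with
  | nil => rfl
  | cons c t => simp only [List.foldl_cons, pvStep, pvLoop_eq, pvRuns]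

theorem pvUniq_nil_iff (s : List String) : pvUniq s = [] ↔ s = [] := by
  cases s with
  | nil => simp [pvUniq]
  | cons x xs =>
    simp only [pvUniq]
    cases h : pvUniq xs with
    | nil => simp
    | cons y t => by_cases hxy : x = y <;> simp [hxy]

theorem pvUniq_mem (s : List String) : ∀ c : String, c ∈ pvUniq s ↔ c ∈ s := by
  induction s with
  | nil => simp [pvUniq]
  | cons x xs ih =>
    intro c
    simp only [pvUniq]
    cases h : pvUniq xs with
    | nil =>
      have hxs : xs = [] := (pvUniq_nil_iff xs).1 h
      subst hxs; simp
    | cons y t =>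
      show c ∈ (if x = y then y :: t else x :: y :: t) ↔ c ∈ x :: xs
      by_cases hxy : x = y
      · rw [if_pos hxy]
        subst hxy
        have hyx : x ∈ xs := (ih x).1 (by simp [h])
        constructor
        · intro hc
          exact List.mem_cons.2 (Or.inr ((ih c).1 (h ▸ hc)))
        · intro hc
          rcases List.mem_cons.1 hc with rfl | hc
          · simp [← h]
            exact (ih c).2 hyx
          · exact h ▸ ((ih c).2 hc)
      · rw [if_neg hxy]
        have ihc := ih c
        rw [h] at ihc
        simp only [List.mem_cons] at ihc ⊢
        tauto

theorem pvUniq_pairwise_lt (s : List String) (hs : s.Pairwise (· ≤ ·)) :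
    (pvUniq s).Pairwise (· < ·) := by
  induction s with
  | nil => simp [pvUniq]
  | cons x xs ih =>
    rw [List.pairwise_cons] at hs
    obtain ⟨hx, hxs⟩ := hs
    have ihp := ih hxs
    simp only [pvUniq]
    cases h : pvUniq xs with
    | nil => simp
    | cons y t =>
      rw [h] at ihp
      show ((if x = y then y :: t else x :: y :: t)).Pairwise (· < ·)
      by_cases hxy : x = y
      · simpa [hxy] using ihp
      · rw [if_neg hxy]
        refine List.pairwise_cons.2 ⟨?_, ihp⟩
        intro c hc
        have hcxs : c ∈ xs := (pvUniq_mem xs c).1 (h ▸ hc)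
        have hxc : x ≤ c := hx c hcxs
        rcases List.mem_cons.1 hc with rfl | hct
        · exact lt_of_le_of_ne hxc hxy
        · have hyxs : y ∈ xs := (pvUniq_mem xs y).1 (by simp [h])
          have hylt : y < c := (List.pairwise_cons.1 ihp).1 c hct
          have : x ≤ y := hx y hyxs
          exact lt_of_le_of_lt this hylt

theorem pvRuns_sorted (s : List String) (hs : s.Pairwise (· ≤ ·)) :
    pvRuns s = (pvUniq s).map (fun c => (c, (s.count c : Int))) := by
  induction s with
  | nil => simp [pvRuns, pvUniq]
  | cons x xs ih =>
    rw [List.pairwise_cons] at hs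
    obtain ⟨hx, hxs⟩ := hs
    have ihe := ih hxs
    have hplt := pvUniq_pairwise_lt xs hxs
    simp only [pvRuns, pvUniq, ihe]
    cases h : pvUniq xs with
    | nil =>
      have hxs0 : xs = [] := (pvUniq_nil_iff xs).1 h
      subst hxs0; simp [pvMerge]
    | cons y t =>
      rw [h] at hplt
      have hyxs : y ∈ xs := (pvUniq_mem xs y).1 (by simp [h])
      show pvMerge (x, 1) ((y :: t).map (fun c => (c, (xs.count c : Int)))) =
        ((if x = y then y :: t else x :: y :: t)).map (fun c => (c, ((x :: xs).count c : Int)))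
      by_cases hxy : x = y
      · rw [if_pos hxy]
        subst hxy
        have htail : t.map (fun c => (c, ((x :: xs).count c : Int))) =
            t.map (fun c => (c, (xs.count c : Int))) := by
          apply List.map_congr_left
          intro c hct
          have hlt : x < c := (List.pairwise_cons.1 hplt).1 c hct
          have hne : (x == c) = false := by simp [ne_of_lt hlt]
          simp [List.count_cons, hne]
        have hcx : (x :: xs).count x = xs.count x + 1 := by simp [List.count_cons]
        have hcast : ((xs.count x + 1 : Nat) : Int) = 1 + (xs.count x : Int) := by push_cast; ring
        simp only [List.map_cons, pvMerge, eq_self_iff_true, if_true, if_pos, htail, hcx, hcast]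
      · rw [if_neg hxy]
        have hnotmem : x ∉ xs := by
          intro hmem
          have h1 : x ≤ y := hx y hyxs
          have h2 : x ∈ pvUniq xs := (pvUniq_mem xs x).2 hmem
          rw [h] at h2
          rcases List.mem_cons.1 h2 with rfl | hxt
          · exact hxy rfl
          · have : y < x := (List.pairwise_cons.1 hplt).1 x hxt
            exact absurd (le_antisymm h1 (le_of_lt this)) hxy
        have hcx : (x :: xs).count x = 1 := by
          have h0 : xs.count x = 0 := List.count_eq_zero.2 hnotmem
          simp [List.count_cons, h0]
        have hcy : (x :: xs).count y = xs.count y := by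
          have hne : (x == y) = false := by simp [hxy]
          simp [List.count_cons, hne]
        have htail : t.map (fun c => (c, ((x :: xs).count c : Int))) =
            t.map (fun c => (c, (xs.count c : Int))) := by
          apply List.map_congr_left
          intro c hct
          have hyc : y < c := (List.pairwise_cons.1 hplt).1 c hct
          have hxc : x ≤ y := hx y hyxs
          have hne : (x == c) = false := by
            have : x ≠ c := ne_of_lt (lt_of_le_of_lt hxc hyc)
            simp [this]
          simp [List.count_cons, hne]
        simp only [List.map_cons, pvMerge, if_neg hxy, htail, hcx, hcy, Nat.cast_one]

theorem pvUniq_eq_sorted_set (companies : List String) :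
    PySem.List.sorted (PySem.Set.ofList companies) (fun x => x) =
      pvUniq (PySem.List.sorted companies (fun x => x)) := by
  set s := PySem.List.sorted companies (fun x => x) with hsdef
  have hsp : s.Pairwise (· ≤ ·) := PySem.List.sorted_pairwise companies (fun x => x)
  have hperm : s.Perm companies := PySem.List.sorted_perm companies (fun x => x) false
  have hlt := pvUniq_pairwise_lt s hsp
  apply PySem.List.sorted_eq_of_perm_of_pairwise_lt
  · rw [List.perm_ext_iff_of_nodup (hlt.imp (fun h => ne_of_lt h)) (PySem.Set.nodup_ofList companies)]
    intro a
    rw [pvUniq_mem, PySem.Set.mem_ofList, hperm.mem_iff]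
  · exact hlt

theorem pvDict_eq (companies : List String) :
    (PySem.List.sorted (PySem.Set.ofList companies) (fun x => x)).foldl
      (fun d each_company =>
        let frequency : Int := (companies.count each_company : Int)
        if d.contains frequency then d.modify frequency [] (fun l => l ++ [each_company])
        else d.insert frequency [each_company]) PySem.Dict.empty =
    pvFinish ((PySem.List.sorted companies (fun x => x)).foldl pvStep (PySem.Dict.empty, none, 0)) := by
  have hsp : (PySem.List.sorted companies (fun x => x)).Pairwise (· ≤ ·) :=
    PySem.List.sorted_pairwise companies (fun x => x)
  have hperm : (PySem.List.sorted companies (fun x => x)).Perm companies :=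
    PySem.List.sorted_perm companies (fun x => x) false
  rw [pvTop_eq, pvRuns_sorted _ hsp, pvUniq_eq_sorted_set companies, pvEmitAll, List.foldl_map]
  apply PySem.List.foldl_congr_mem
  intro d c hc
  simp only [pvEmit_eq, hperm.count_eq c]

-- ===== VERDICT (by name: the statement is the Claim_ definition above) =====
theorem create_list_of_freq_and_companies_spec : Claim_equal_create_list_of_freq_and_companies := by
  intro companies _
  show create_list_of_freq_and_companies companies = create_list_of_freq_and_companies_alt companies
  exact congrArg
    (fun d => PySem.List.sorted2 (PySem.Dict.items d) (fun p => p.1) (fun p => p.2) true)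
    (pvDict_eq companies)
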